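-- pv_equiv track=rewrite | github.com/mattHawthorn/TextMiningFInal | code/sparse_to_array.py | compress_indices
-- ===== SOURCE A (Python) =====
-- def compress_indices(docs):
--     # collect all the indices that actually appear
--     indices = {}
--     newdocs = []
--     i = 0
--     for doc in docs:
--         newdoc = {}
--         for key in doc:
--             index = indices.get(key,i)
--             newdoc[index] = doc[key]
--             if index==i:
--                 indices[key] = i
--                 i+=1
--         newdocs.append(newdoc)
--     return newdocs,indices
-- ===== SOURCE B (Python) =====
-- def compress_indices(docs):
--     # Two-phase rewrite: build the key -> compact-index table in one pass
--     # (first-appearance order, index = current table size), then remap every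
--     # doc with the finished table in a second pass.
--     docs = list(docs)
--     indices = {}
--     for doc in docs:
--         for key in doc:
--             if key not in indices:
--                 indices[key] = len(indices)
--     newdocs = [{indices[key]: doc[key] for key in doc} for doc in docs]
--     return newdocs, indices
-- ===== Notes on version B (the rewrite author's own statement) =====
-- stated objective: alternative
-- what changed: Replaces the single interleaved pass (which maintains a running counter and builds each remapped doc while the index table is still growing) by two separate phases: one pass that only builds the key-to-index table in first-appearance order (using len(indices) as the next index), then a second pass that remaps every doc with the finished table via a dict comprehension.
import Mathlib
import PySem

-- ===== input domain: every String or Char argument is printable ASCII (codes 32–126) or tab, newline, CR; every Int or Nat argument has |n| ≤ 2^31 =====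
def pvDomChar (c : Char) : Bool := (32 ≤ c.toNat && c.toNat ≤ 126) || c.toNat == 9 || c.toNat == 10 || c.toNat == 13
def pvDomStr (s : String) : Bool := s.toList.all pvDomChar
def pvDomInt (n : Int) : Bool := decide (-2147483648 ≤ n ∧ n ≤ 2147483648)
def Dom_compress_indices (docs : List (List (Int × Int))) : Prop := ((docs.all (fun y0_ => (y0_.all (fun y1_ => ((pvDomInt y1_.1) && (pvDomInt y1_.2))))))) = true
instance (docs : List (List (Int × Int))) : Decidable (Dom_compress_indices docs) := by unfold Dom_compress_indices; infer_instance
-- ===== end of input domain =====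

-- B separates A's single interleaved pass into two phases: build the key->index
-- table first (index = current table size), then remap all docs with the finished table.


-- ===== PORT A =====
-- each doc (a Python dict) arrives as an association list; it is materialised as a
-- PySem.Dict (dict construction: first-occurrence key order, last value wins) and
-- 'for key in doc: … doc[key] …' iterates its items.

-- body of A's inner loop: state = (newdoc, indices, i)
def pvStepA (st : PySem.Dict Int Int × PySem.Dict Int Int × Int) (kv : Int × Int) :
    PySem.Dict Int Int × PySem.Dict Int Int × Int :=
  let index : Int := (st.2.1.get? kv.1).getD st.2.2
  let nd := st.1.insert index kv.2
  if index = st.2.2 then (nd, st.2.1.insert kv.1 st.2.2, st.2.2 + 1) else (nd, st.2.1, st.2.2)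

-- body of A's outer loop: state = (newdocs, indices, i)
def pvDocA (st : List (List (Int × Int)) × PySem.Dict Int Int × Int) (doc : List (Int × Int)) :
    List (List (Int × Int)) × PySem.Dict Int Int × Int :=
  let r := (PySem.Dict.ofList doc).items.foldl pvStepA (PySem.Dict.empty, st.2)
  (st.1 ++ [r.1.items], r.2)

def compress_indices (docs : List (List (Int × Int))) : (List (List (Int × Int))) × (List (Int × Int)) :=
  let r := docs.foldl pvDocA ([], PySem.Dict.empty, 0)
  (r.1, r.2.1.items)

-- ===== PORT B =====
-- phase 1 body: 'if key not in indices: indices[key] = len(indices)'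
def pvAssign (ind : PySem.Dict Int Int) (k : Int) : PySem.Dict Int Int :=
  if ind.contains k then ind else ind.insert k (ind.size : Int)

def pvTable (docs : List (List (Int × Int))) : PySem.Dict Int Int :=
  docs.foldl (fun ind doc => (PySem.Dict.ofList doc).keys.foldl pvAssign ind) PySem.Dict.empty

-- phase 2: '{indices[key]: doc[key] for key in doc}'; every key of doc is in the
-- table after phase 1, so the getD default 0 is never used
def pvApply (ind : PySem.Dict Int Int) (doc : List (Int × Int)) : List (Int × Int) :=
  ((PySem.Dict.ofList doc).items.foldl
      (fun nd kv => nd.insert (ind.getD kv.1 0) kv.2) PySem.Dict.empty).items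

def compress_indices_alt (docs : List (List (Int × Int))) : (List (List (Int × Int))) × (List (Int × Int)) :=
  let ind := pvTable docs
  (docs.map (pvApply ind), ind.items)

-- ===== PRECONDITION & SPEC =====
def Spec_compress_indices (docs : List (List (Int × Int))) (out : (List (List (Int × Int))) × (List (Int × Int))) : Prop := out = compress_indices_alt docs
instance (docs : List (List (Int × Int))) (out : (List (List (Int × Int))) × (List (Int × Int))) : Decidable (Spec_compress_indices docs out) := by unfold Spec_compress_indices; infer_instance

-- ===== CLAIM (what is proved, stated in full; the proofs are below) =====
def Claim_equal_compress_indices : Prop := ∀ (docs : List (List (Int × Int))), Dom_compress_indices docs → Spec_compress_indices docs (compress_indices docs)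

-- ===== LEMMAS AND PROOFS =====

-- invariant of A's (indices, i) state: nodup keys, i = size, all stored indices < i
def pvInv (ind : PySem.Dict Int Int) (i : Int) : Prop :=
  ind.keys.Nodup ∧ (ind.size : Int) = i ∧ ∀ p ∈ ind.items, p.2 < i

-- the later table only ever extends the earlier one
def pvExt (d d' : PySem.Dict Int Int) : Prop := ∀ k v, d.get? k = some v → d'.get? k = some v

theorem pvExt_refl (d : PySem.Dict Int Int) : pvExt d d := fun _ _ h => h

-- one step of A, analysed against B's pvAssign
theorem pvStepA_char (nd ind : PySem.Dict Int Int) (i : Int) (kv : Int × Int)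
    (h : pvInv ind i) :
    pvInv (pvStepA (nd, ind, i) kv).2.1 (pvStepA (nd, ind, i) kv).2.2 ∧
    pvExt ind (pvStepA (nd, ind, i) kv).2.1 ∧
    (pvStepA (nd, ind, i) kv).2.1 = pvAssign ind kv.1 ∧
    (∀ indF, pvExt (pvStepA (nd, ind, i) kv).2.1 indF →
      (pvStepA (nd, ind, i) kv).1 = nd.insert (indF.getD kv.1 0) kv.2) := by
  obtain ⟨hnd, hsz, hlt⟩ := h
  cases hget : ind.get? kv.1 with
  | some w =>
    have hwlt : w < i := hlt _ (PySem.Dict.mem_items_of_get?_eq_some ind hget)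
    have hcont : ind.contains kv.1 = true := by
      rw [PySem.Dict.contains_eq_isSome_get?, hget]; rfl
    have hstep : pvStepA (nd, ind, i) kv = (nd.insert w kv.2, ind, i) := by
      simp [pvStepA, hget, ne_of_lt hwlt]
    rw [hstep]
    refine ⟨⟨hnd, hsz, hlt⟩, pvExt_refl _, by simp [pvAssign, hcont], ?_⟩
    intro indF hF
    have h2 : indF.getD kv.1 0 = w := by
      rw [PySem.Dict.getD_eq_get?_getD, hF _ _ hget]; rfl
    rw [h2]
  | none =>
    have hcont : ind.contains kv.1 = false := by
      rw [PySem.Dict.contains_eq_isSome_get?, hget]; rfl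
    have hstep : pvStepA (nd, ind, i) kv = (nd.insert i kv.2, ind.insert kv.1 i, i + 1) := by
      simp [pvStepA, hget]
    rw [hstep]
    refine ⟨⟨PySem.Dict.nodup_keys_insert ind kv.1 i hnd, ?_, ?_⟩, ?_,
      by simp [pvAssign, hcont, ← hsz], ?_⟩
    · show ((ind.insert kv.1 i).size : Int) = i + 1
      rw [PySem.Dict.size_insert, hcont]
      simp only [Bool.false_eq_true, reduceIte]
      push_cast; omega
    · show ∀ p ∈ (ind.insert kv.1 i).items, p.2 < i + 1
      intro p hp
      rw [PySem.Dict.items_insert_of_not_contains ind i hcont] at hp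
      rcases List.mem_append.mp hp with h1 | h1
      · exact lt_trans (hlt _ h1) (by omega)
      · simp only [List.mem_singleton] at h1
        rw [h1]; show i < i + 1; omega
    · intro k v hkv
      have hk : k ≠ kv.1 := by intro he; rw [he, hget] at hkv; simp at hkv
      rw [PySem.Dict.get?_insert_of_ne ind i hk]; exact hkv
    · intro indF hF
      have h2 : indF.getD kv.1 0 = i := by
        rw [PySem.Dict.getD_eq_get?_getD, hF _ _ (PySem.Dict.get?_insert_self ind kv.1 i)]; rfl
      rw [h2]

-- A's inner loop over a doc's items, characterised: the table evolves exactly as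
-- B's phase-1 fold, and the produced newdoc is B's remap under ANY extension of
-- the resulting table
theorem pvInner (l : List (Int × Int)) :
    ∀ (nd ind : PySem.Dict Int Int) (i : Int), pvInv ind i →
    pvInv (l.foldl pvStepA (nd, ind, i)).2.1 (l.foldl pvStepA (nd, ind, i)).2.2 ∧
    pvExt ind (l.foldl pvStepA (nd, ind, i)).2.1 ∧
    (l.foldl pvStepA (nd, ind, i)).2.1 = l.foldl (fun a kv => pvAssign a kv.1) ind ∧
    (∀ indF, pvExt (l.foldl pvStepA (nd, ind, i)).2.1 indF →
      (l.foldl pvStepA (nd, ind, i)).1 =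
        l.foldl (fun a kv => a.insert (indF.getD kv.1 0) kv.2) nd) := by
  induction l with
  | nil =>
    intro nd ind i h
    exact ⟨h, pvExt_refl _, rfl, fun _ _ => rfl⟩
  | cons kv l ih =>
    intro nd ind i h
    obtain ⟨h1, h2, h3, h4⟩ := pvStepA_char nd ind i kv h
    obtain ⟨s1, s2, s3, hs⟩ : ∃ nd' ind' i', pvStepA (nd, ind, i) kv = (nd', ind', i') :=
      ⟨_, _, _, rfl⟩
    rw [hs] at h1 h2 h3 h4
    dsimp only at h1 h2 h3 h4
    obtain ⟨g1, g2, g3, g4⟩ := ih s1 s2 s3 h1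
    simp only [List.foldl_cons, hs]
    refine ⟨g1, fun k v hv => g2 k v (h2 k v hv), by rw [g3, h3], ?_⟩
    intro indF hF
    rw [g4 indF hF, h4 indF (fun k v hv => hF k v (g2 k v hv))]

-- A's outer loop, characterised against B's two phases
theorem pvOuter (docs : List (List (Int × Int))) :
    ∀ (acc : List (List (Int × Int))) (ind : PySem.Dict Int Int) (i : Int), pvInv ind i →
    pvInv (docs.foldl pvDocA (acc, ind, i)).2.1 (docs.foldl pvDocA (acc, ind, i)).2.2 ∧
    pvExt ind (docs.foldl pvDocA (acc, ind, i)).2.1 ∧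
    (docs.foldl pvDocA (acc, ind, i)).2.1 =
      docs.foldl (fun a doc => (PySem.Dict.ofList doc).keys.foldl pvAssign a) ind ∧
    (∀ indF, pvExt (docs.foldl pvDocA (acc, ind, i)).2.1 indF →
      (docs.foldl pvDocA (acc, ind, i)).1 = acc ++ docs.map (pvApply indF)) := by
  induction docs with
  | nil =>
    intro acc ind i h
    exact ⟨h, pvExt_refl _, rfl, fun _ _ => by simp⟩
  | cons doc docs ih =>
    intro acc ind i h
    obtain ⟨h1, h2, h3, h4⟩ := pvInner (PySem.Dict.ofList doc).items PySem.Dict.empty ind i h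
    obtain ⟨s1, s2, s3, hs⟩ : ∃ nd' ind' i',
        (PySem.Dict.ofList doc).items.foldl pvStepA (PySem.Dict.empty, ind, i) = (nd', ind', i') :=
      ⟨_, _, _, rfl⟩
    rw [hs] at h1 h2 h3 h4
    dsimp only at h1 h2 h3 h4
    have hdoc : pvDocA (acc, ind, i) doc = (acc ++ [s1.items], s2, s3) := by
      simp only [pvDocA, hs]
    simp only [List.foldl_cons, hdoc]
    obtain ⟨g1, g2, g3, g4⟩ := ih (acc ++ [s1.items]) s2 s3 h1
    have hkeys : (PySem.Dict.ofList doc).keys.foldl pvAssign ind =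
        (PySem.Dict.ofList doc).items.foldl (fun a kv => pvAssign a kv.1) ind := by
      rw [show (PySem.Dict.ofList doc).keys = (PySem.Dict.ofList doc).items.map (·.1) from rfl,
        List.foldl_map]
    refine ⟨g1, fun k v hv => g2 k v (h2 k v hv), by rw [g3, h3, hkeys], ?_⟩
    intro indF hF
    have hExt : pvExt s2 indF := fun k v hv => hF k v (g2 k v hv)
    rw [g4 indF hF]
    have hap : s1.items = pvApply indF doc := by
      rw [pvApply, h4 indF hExt]
    simp [hap]

-- ===== VERDICT (by name: the statement is the Claim_ definition above) =====
theorem compress_indices_spec : Claim_equal_compress_indices := by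
  intro docs _
  unfold Spec_compress_indices compress_indices compress_indices_alt pvTable
  have hInv : pvInv PySem.Dict.empty 0 :=
    ⟨PySem.Dict.nodup_keys_empty, by rw [PySem.Dict.size_empty]; rfl,
     fun p hp => by simp [PySem.Dict.empty] at hp⟩
  obtain ⟨h1, h2, h3, h4⟩ := pvOuter docs [] PySem.Dict.empty 0 hInv
  obtain ⟨s1, s2, s3, hs⟩ : ∃ a b c, docs.foldl pvDocA ([], PySem.Dict.empty, 0) = (a, b, c) :=
    ⟨_, _, _, rfl⟩
  rw [hs] at h1 h2 h3 h4 ⊢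
  dsimp only at h1 h2 h3 h4 ⊢
  have hr := h4 s2 (pvExt_refl s2)
  simp only [List.nil_append] at hr
  rw [hr, ← h3]
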